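-- pv_equiv track=rewrite | github.com/brantfaircloth/encounters | EncounterRate.py | ParseEncounters
-- ===== SOURCE A (Python) =====
-- def ParseEncounters(encounters):
--     '''Take the encounter data, and count the number of males and females
--     within'''
--     males, females = 0,0
--     for e in encounters:
--         if e[1] == 'male':
--             males += 1
--         elif e[1] == 'female':
--             females += 1
--     return males, females
-- ===== SOURCE B (Python) =====
-- def ParseEncounters(encounters):
--     '''Take the encounter data, and count the number of males and females
--     within'''
--     tags = [e[1] for e in encounters]
--     return tags.count('male'), tags.count('female')
-- ===== Notes on version B (the rewrite author's own statement) =====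
-- stated objective: idiomatic
-- what changed: Replaces A's single loop that branches (if/elif) and increments two scalar accumulators with a staged formulation: first project the tag column, then take two independent list.count scans, so no accumulator state and no branching remain.
import Mathlib
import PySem

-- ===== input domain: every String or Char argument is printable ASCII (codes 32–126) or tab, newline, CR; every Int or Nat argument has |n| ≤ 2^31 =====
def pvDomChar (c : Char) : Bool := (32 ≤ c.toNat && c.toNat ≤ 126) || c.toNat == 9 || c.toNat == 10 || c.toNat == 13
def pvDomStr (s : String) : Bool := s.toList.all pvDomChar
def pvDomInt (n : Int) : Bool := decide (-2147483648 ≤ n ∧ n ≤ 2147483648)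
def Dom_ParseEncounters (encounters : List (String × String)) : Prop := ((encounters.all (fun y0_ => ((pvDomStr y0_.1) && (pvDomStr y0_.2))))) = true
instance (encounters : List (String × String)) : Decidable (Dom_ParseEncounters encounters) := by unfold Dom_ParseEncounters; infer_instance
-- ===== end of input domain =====

-- B replaces A's branch-and-increment loop with a projection of the tag column followed by two independent list.count scans — more idiomatic, same cost.

-- ===== PORT A =====
def ParseEncounters (encounters : List (String × String)) : Int × Int :=
  -- males, females = 0,0; for e in encounters: if/elif branch increments
  encounters.foldl
    (fun mf e =>
      if e.2 == "male" then (mf.1 + 1, mf.2)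
      else if e.2 == "female" then (mf.1, mf.2 + 1)
      else mf)
    (0, 0)

-- ===== PORT B =====
def ParseEncounters_alt (encounters : List (String × String)) : Int × Int :=
  -- tags = [e[1] for e in encounters]; return tags.count('male'), tags.count('female')
  let tags := encounters.map (fun e => e.2)
  ((PySem.List.count tags "male" : Int), (PySem.List.count tags "female" : Int))

-- ===== PRECONDITION & SPEC =====
def Spec_ParseEncounters (encounters : List (String × String)) (out : Int × Int) : Prop := out = ParseEncounters_alt encounters
instance (encounters : List (String × String)) (out : Int × Int) : Decidable (Spec_ParseEncounters encounters out) := by unfold Spec_ParseEncounters; infer_instance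

-- ===== CLAIM (what is proved, stated in full; the proofs are below) =====
def Claim_equal_ParseEncounters : Prop := ∀ (encounters : List (String × String)), Dom_ParseEncounters encounters → Spec_ParseEncounters encounters (ParseEncounters encounters)

-- ===== LEMMAS AND PROOFS =====
-- A's fold, started from any accumulator, adds the counts of the two tags.
theorem parseA_fold (l : List (String × String)) (m f : Int) :
    l.foldl
      (fun mf e =>
        if e.2 == "male" then (mf.1 + 1, mf.2)
        else if e.2 == "female" then (mf.1, mf.2 + 1)
        else mf)
      (m, f)
    = (m + ((l.map (fun e => e.2)).count "male" : Int),
       f + ((l.map (fun e => e.2)).count "female" : Int)) := by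
  induction l generalizing m f with
  | nil => simp
  | cons e t ih =>
    simp only [List.foldl_cons, List.map_cons]
    by_cases hm : e.2 = "male"
    · simp only [hm, beq_self_eq_true, if_true, ih, List.count_cons]
      simp
      ring
    · by_cases hf : e.2 = "female"
      · simp only [hf, beq_self_eq_true, if_true, ih, List.count_cons]
        have : ¬ ((("female" : String) == "male") = true) := by decide
        simp [this]
        ring
      · rw [if_neg (by simp [hm]), if_neg (by simp [hf]), ih]
        simp [hm, hf]

-- ===== VERDICT (by name: the statement is the Claim_ definition above) =====
theorem ParseEncounters_spec : Claim_equal_ParseEncounters := by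
  intro encounters _
  unfold Spec_ParseEncounters ParseEncounters ParseEncounters_alt
  rw [parseA_fold]
  simp [PySem.List.count_eq]
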